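-- pv_equiv track=rewrite | github.com/AshishSalaskar1/DS_Algo_Playground | Track/DSA_A_to_Z/Graphs/BFS_DFS/Multisource_BFS/Infect_all_people.py | solve
-- ===== SOURCE A (Python) =====
-- from collections import deque
--
-- def solve(arr, nr, nc):
--     healthy_set = set()
--     infect_q = deque()
--
--     for i in range(nr):
--         for j in range(nc):
--             if arr[i][j] == 2:  # Infected cell
--                 infect_q.append((i, j, 0))
--             elif arr[i][j] == 1:  # Healthy cell
--                 healthy_set.add((i, j))
--
--     vis = set()
--     # Multi-source BFS on infections
--     while infect_q:
--         r, c, dist = infect_q.popleft()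
--
--         # Mark as visited
--         vis.add((r, c))
--
--         # If this cell was healthy, remove it from the set
--         if (r, c) in healthy_set:
--             healthy_set.remove((r, c))
--
--         # If all healthy cells are infected
--         if not healthy_set:
--             return dist
--
--         # Spread infection to neighbors
--         for dx, dy in [(0, 1), (1, 0), (0, -1), (-1, 0)]:
--             nextr, nextc = r + dx, c + dy
--             if (
--                 0 <= nextr < nr and 0 <= nextc < nc and
--                 arr[nextr][nextc] !=0 and  # Only spread to healthy cells
--                 (nextr, nextc) not in vis
--             ):
--                 infect_q.append((nextr, nextc, dist + 1))
--                 vis.add((nextr, nextc))  # Mark as visited immediately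
--
--     # If there are still healthy cells left, return -1
--     return -1
-- ===== SOURCE B (Python) =====
-- # Cellular-automaton style dilation: instead of a BFS queue with visited/distance
-- # bookkeeping, repeatedly rescan the whole grid and grow the reached set by one
-- # ring per round until every healthy cell is covered (or growth stops).
-- def solve(arr, nr, nc):
--     reached = set()
--     healthy = set()
--     for i in range(nr):
--         for j in range(nc):
--             if arr[i][j] == 2:
--                 reached.add((i, j))
--             elif arr[i][j] == 1:
--                 healthy.add((i, j))
--
--     if not healthy:
--         return 0 if reached else -1
--
--     t = 0
--     while not healthy <= reached:
--         grown = {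
--             (i, j)
--             for i in range(nr)
--             for j in range(nc)
--             if arr[i][j] != 0 and (i, j) not in reached and
--             ((i - 1, j) in reached or (i + 1, j) in reached or
--              (i, j - 1) in reached or (i, j + 1) in reached)
--         }
--         if not grown:
--             return -1
--         reached |= grown
--         t += 1
--     return t
-- ===== Notes on version B (the rewrite author's own statement) =====
-- stated objective: alternative
-- what changed: B replaces the multi-source BFS queue with distance tags and a visited set by a cellular-automaton dilation: each round it rescans the whole grid and adds every nonzero cell adjacent to the reached set, counting rounds until the healthy cells are covered; it trades per-cell queue/visited bookkeeping for repeated full-grid scans.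
import Mathlib
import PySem

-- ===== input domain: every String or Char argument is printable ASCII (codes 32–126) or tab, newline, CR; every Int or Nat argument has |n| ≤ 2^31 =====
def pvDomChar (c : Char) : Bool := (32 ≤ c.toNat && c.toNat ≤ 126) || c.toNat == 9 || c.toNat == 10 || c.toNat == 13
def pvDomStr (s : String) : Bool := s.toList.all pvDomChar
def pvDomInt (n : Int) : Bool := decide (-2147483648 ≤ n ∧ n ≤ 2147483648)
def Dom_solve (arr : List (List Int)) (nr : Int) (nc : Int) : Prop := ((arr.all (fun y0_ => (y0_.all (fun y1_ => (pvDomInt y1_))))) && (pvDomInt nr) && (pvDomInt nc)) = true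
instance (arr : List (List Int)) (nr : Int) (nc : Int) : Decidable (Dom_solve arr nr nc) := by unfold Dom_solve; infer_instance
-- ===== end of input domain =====

-- B replaces A's multi-source BFS queue (distance tags + visited set) by a
-- cellular-automaton dilation: rescan the whole grid each round, grow the
-- reached set by one ring, and count rounds (alternative algorithm, not faster).

-- arr[i][j]; total form, exact whenever 0 ≤ i < arr.length and 0 ≤ j < (arr[i]).length
def gridAt (arr : List (List Int)) (i j : Int) : Int :=
  (PySem.List.pyGet? ((PySem.List.pyGet? arr i).getD []) j).getD 0

-- ===== PORT A =====
def dirsA : List (Int × Int) := [(0, 1), (1, 0), (0, -1), (-1, 0)]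

def seedStepA (arr : List (List Int)) (i : Int)
    (acc : List (Int × Int × Int) × PySem.Set (Int × Int)) (j : Int) :
    List (Int × Int × Int) × PySem.Set (Int × Int) :=
  if gridAt arr i j = 2 then (acc.1 ++ [(i, j, (0 : Int))], acc.2)
  else if gridAt arr i j = 1 then (acc.1, PySem.Set.add acc.2 (i, j))
  else acc

def seedA (arr : List (List Int)) (nr nc : Int) :
    List (Int × Int × Int) × PySem.Set (Int × Int) :=
  (PySem.List.pyRange 0 nr 1).foldl (fun acc i =>
    (PySem.List.pyRange 0 nc 1).foldl (seedStepA arr i) acc) ([], PySem.Set.empty)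

def spreadStepA (arr : List (List Int)) (nr nc r c dist : Int)
    (st : List (Int × Int × Int) × PySem.Set (Int × Int)) (p : Int × Int) :
    List (Int × Int × Int) × PySem.Set (Int × Int) :=
  let nextr := r + p.1
  let nextc := c + p.2
  if 0 ≤ nextr ∧ nextr < nr ∧ 0 ≤ nextc ∧ nextc < nc ∧
      gridAt arr nextr nextc ≠ 0 ∧ (nextr, nextc) ∉ st.2 then
    (st.1 ++ [(nextr, nextc, dist + 1)], PySem.Set.add st.2 (nextr, nextc))
  else st

def loopA (arr : List (List Int)) (nr nc : Int) :
    Nat → List (Int × Int × Int) → PySem.Set (Int × Int) → PySem.Set (Int × Int) → Int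
  | _, [], _, _ => -1
  | 0, _ :: _, _, _ => -1
  | fuel + 1, (r, c, dist) :: rest, vis, hs =>
    let vis1 := PySem.Set.add vis (r, c)
    let hs1 := if (r, c) ∈ hs then (PySem.Set.remove? hs (r, c)).getD hs else hs
    if hs1 = [] then dist
    else
      let st := dirsA.foldl (spreadStepA arr nr nc r c dist) (rest, vis1)
      loopA arr nr nc fuel st.1 st.2 hs1

def solve (arr : List (List Int)) (nr : Int) (nc : Int) : Int :=
  let st := seedA arr nr nc
  loopA arr nr nc (st.1.length + nr.toNat * nc.toNat) st.1 PySem.Set.empty st.2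

-- ===== PORT B =====
def seedStepB (arr : List (List Int)) (i : Int)
    (acc : PySem.Set (Int × Int) × PySem.Set (Int × Int)) (j : Int) :
    PySem.Set (Int × Int) × PySem.Set (Int × Int) :=
  if gridAt arr i j = 2 then (PySem.Set.add acc.1 (i, j), acc.2)
  else if gridAt arr i j = 1 then (acc.1, PySem.Set.add acc.2 (i, j))
  else acc

def seedB (arr : List (List Int)) (nr nc : Int) :
    PySem.Set (Int × Int) × PySem.Set (Int × Int) :=
  (PySem.List.pyRange 0 nr 1).foldl (fun acc i =>
    (PySem.List.pyRange 0 nc 1).foldl (seedStepB arr i) acc) (PySem.Set.empty, PySem.Set.empty)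

-- the set comprehension: all not-yet-reached nonzero cells adjacent to the reached set
def grownB (arr : List (List Int)) (nr nc : Int) (reached : PySem.Set (Int × Int)) :
    PySem.Set (Int × Int) :=
  (PySem.List.pyRange 0 nr 1).foldl (fun acc i =>
    (PySem.List.pyRange 0 nc 1).foldl (fun acc2 j =>
      if gridAt arr i j ≠ 0 ∧ (i, j) ∉ reached ∧
          ((i - 1, j) ∈ reached ∨ (i + 1, j) ∈ reached ∨
           (i, j - 1) ∈ reached ∨ (i, j + 1) ∈ reached)
      then PySem.Set.add acc2 (i, j) else acc2) acc) PySem.Set.empty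

def loopB (arr : List (List Int)) (nr nc : Int) (healthy : PySem.Set (Int × Int)) :
    Nat → PySem.Set (Int × Int) → Int → Int
  | 0, _, _ => -1
  | fuel + 1, reached, t =>
    if ∀ p ∈ healthy, p ∈ reached then t
    else
      let g := grownB arr nr nc reached
      if g = [] then -1
      else loopB arr nr nc healthy fuel (g.foldl PySem.Set.add reached) (t + 1)

def solve_alt (arr : List (List Int)) (nr : Int) (nc : Int) : Int :=
  let st := seedB arr nr nc
  if st.2 = [] then (if st.1 = [] then -1 else 0)
  else loopB arr nr nc st.2 (nr.toNat * nc.toNat + 1) st.1 0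

-- ===== PRECONDITION & SPEC =====
-- Pre_ excludes exactly the inputs on which A's seeding loop raises IndexError:
-- a positive nr×nc window that is not fully covered by the grid.
def Pre_solve (arr : List (List Int)) (nr : Int) (nc : Int) : Prop :=
  0 < nr → 0 < nc → (nr.toNat ≤ arr.length ∧ ∀ row ∈ arr.take nr.toNat, nc.toNat ≤ row.length)
instance (arr : List (List Int)) (nr : Int) (nc : Int) : Decidable (Pre_solve arr nr nc) := by
  unfold Pre_solve; infer_instance

def pvWitness_solve : List (List Int) × Int × Int := ([[2, 1], [1, 0]], 2, 2)

def Spec_solve (arr : List (List Int)) (nr : Int) (nc : Int) (out : Int) : Prop := out = solve_alt arr nr nc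
instance (arr : List (List Int)) (nr : Int) (nc : Int) (out : Int) : Decidable (Spec_solve arr nr nc out) := by unfold Spec_solve; infer_instance

-- ===== CLAIM (what is proved, stated in full; the proofs are below) =====
def Claim_equal_solve : Prop := ∀ (arr : List (List Int)) (nr : Int) (nc : Int), Dom_solve arr nr nc → Pre_solve arr nr nc → Spec_solve arr nr nc (solve arr nr nc)

-- ===== LEMMAS AND PROOFS =====

def InR (nr nc : Int) (p : Int × Int) : Prop := 0 ≤ p.1 ∧ p.1 < nr ∧ 0 ≤ p.2 ∧ p.2 < nc

-- a Nodup list of in-window cells has at most nr.toNat * nc.toNat elements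
lemma length_le_area (nr nc : Int) (s : List (Int × Int)) (hnd : s.Nodup)
    (h : ∀ p ∈ s, InR nr nc p) : s.length ≤ nr.toNat * nc.toNat := by
  classical
  have hsub : s ⊆ ((List.range nr.toNat).product (List.range nc.toNat)).map
      (fun q => ((q.1 : Int), (q.2 : Int))) := by
    intro p hp
    obtain ⟨h1, h2, h3, h4⟩ := h p hp
    refine List.mem_map.mpr ⟨(p.1.toNat, p.2.toNat), ?_, ?_⟩
    · exact List.pair_mem_product.mpr ⟨List.mem_range.mpr (by omega), List.mem_range.mpr (by omega)⟩
    · simp only []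
      exact Prod.ext (by simp [Int.toNat_of_nonneg h1]) (by simp [Int.toNat_of_nonneg h3])
  have hle := (hnd.subperm hsub).length_le
  rw [List.length_map] at hle
  have hle2 : s.length ≤ ((List.range nr.toNat) ×ˢ (List.range nc.toNat)).length := hle
  have hlp := List.length_product (List.range nr.toNat) (List.range nc.toNat)
  simp only [List.length_range] at hlp
  omega

lemma mem_foldl_add (l : List (Int × Int)) (s : PySem.Set (Int × Int)) (p : Int × Int) :
    p ∈ l.foldl PySem.Set.add s ↔ p ∈ s ∨ p ∈ l := by
  induction l generalizing s with
  | nil => simp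
  | cons x xs ih =>
    rw [List.foldl_cons, ih]
    simp [PySem.Set.mem_add]
    tauto

lemma nodup_foldl_add (l : List (Int × Int)) (s : PySem.Set (Int × Int)) (h : s.Nodup) :
    (l.foldl PySem.Set.add s).Nodup := by
  induction l generalizing s with
  | nil => exact h
  | cons x xs ih => exact ih _ (PySem.Set.nodup_add _ _ h)

lemma length_foldl_add_lt (l : List (Int × Int)) (s : PySem.Set (Int × Int)) (hnd : s.Nodup)
    (x : Int × Int) (hx : x ∈ l) (hxs : x ∉ s) :
    s.length + 1 ≤ (l.foldl PySem.Set.add s).length := by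
  have hsub : s ++ [x] ⊆ l.foldl PySem.Set.add s := by
    intro p hp
    rcases List.mem_append.mp hp with hp' | hp'
    · exact (mem_foldl_add l s p).mpr (Or.inl hp')
    · have : p = x := by simpa using hp'
      exact (mem_foldl_add l s p).mpr (Or.inr (this ▸ hx))
  have hnd2 : (s ++ [x]).Nodup := by
    simp only [List.nodup_append, List.nodup_cons, List.not_mem_nil, not_false_iff,
      List.nodup_nil, and_true, true_and]
    refine ⟨hnd, ?_⟩
    intro a ha b hb
    have : b = x := by simpa using hb
    subst this
    exact fun he => hxs (he ▸ ha)
  have := (hnd2.subperm hsub).length_le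
  simpa using this

lemma mem_grownB_inner (arr : List (List Int)) (reached : PySem.Set (Int × Int)) (i : Int) :
    ∀ (js : List Int) (acc : PySem.Set (Int × Int)) (p : Int × Int),
    p ∈ js.foldl (fun acc2 j =>
        if gridAt arr i j ≠ 0 ∧ (i, j) ∉ reached ∧
            ((i - 1, j) ∈ reached ∨ (i + 1, j) ∈ reached ∨
             (i, j - 1) ∈ reached ∨ (i, j + 1) ∈ reached)
        then PySem.Set.add acc2 (i, j) else acc2) acc ↔
      p ∈ acc ∨ ∃ j ∈ js, p = (i, j) ∧ gridAt arr i j ≠ 0 ∧ (i, j) ∉ reached ∧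
        ((i - 1, j) ∈ reached ∨ (i + 1, j) ∈ reached ∨
         (i, j - 1) ∈ reached ∨ (i, j + 1) ∈ reached) := by
  intro js
  induction js with
  | nil => simp
  | cons j js ih =>
    intro acc p
    rw [List.foldl_cons]
    by_cases hC : gridAt arr i j ≠ 0 ∧ (i, j) ∉ reached ∧
        ((i - 1, j) ∈ reached ∨ (i + 1, j) ∈ reached ∨
         (i, j - 1) ∈ reached ∨ (i, j + 1) ∈ reached)
    · rw [if_pos hC, ih]
      rw [PySem.Set.mem_add]
      constructor
      · rintro ((hp | rfl) | ⟨j', hj', hrest⟩)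
        · exact Or.inl hp
        · exact Or.inr ⟨j, List.mem_cons_self, rfl, hC⟩
        · exact Or.inr ⟨j', List.mem_cons_of_mem _ hj', hrest⟩
      · rintro (hp | ⟨j', hj', rfl, hrest⟩)
        · exact Or.inl (Or.inl hp)
        · rcases List.mem_cons.mp hj' with rfl | hj''
          · exact Or.inl (Or.inr rfl)
          · exact Or.inr ⟨j', hj'', rfl, hrest⟩
    · rw [if_neg hC, ih]
      constructor
      · rintro (hp | ⟨j', hj', hrest⟩)
        · exact Or.inl hp
        · exact Or.inr ⟨j', List.mem_cons_of_mem _ hj', hrest⟩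
      · rintro (hp | ⟨j', hj', rfl, hrest⟩)
        · exact Or.inl hp
        · rcases List.mem_cons.mp hj' with rfl | hj''
          · exact absurd hrest hC
          · exact Or.inr ⟨j', hj'', rfl, hrest⟩

lemma mem_grownB_outer (arr : List (List Int)) (reached : PySem.Set (Int × Int)) (nc : Int) :
    ∀ (is_ : List Int) (acc : PySem.Set (Int × Int)) (p : Int × Int),
    p ∈ is_.foldl (fun acc i => (PySem.List.pyRange 0 nc 1).foldl (fun acc2 j =>
        if gridAt arr i j ≠ 0 ∧ (i, j) ∉ reached ∧
            ((i - 1, j) ∈ reached ∨ (i + 1, j) ∈ reached ∨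
             (i, j - 1) ∈ reached ∨ (i, j + 1) ∈ reached)
        then PySem.Set.add acc2 (i, j) else acc2) acc) acc ↔
      p ∈ acc ∨ ∃ i ∈ is_, ∃ j ∈ PySem.List.pyRange 0 nc 1,
        p = (i, j) ∧ gridAt arr i j ≠ 0 ∧ (i, j) ∉ reached ∧
        ((i - 1, j) ∈ reached ∨ (i + 1, j) ∈ reached ∨
         (i, j - 1) ∈ reached ∨ (i, j + 1) ∈ reached) := by
  intro is_
  induction is_ with
  | nil => simp
  | cons i is_ ih =>
    intro acc p
    rw [List.foldl_cons, ih, mem_grownB_inner]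
    constructor
    · rintro ((hp | ⟨j, hj, hrest⟩) | ⟨i', hi', hrest⟩)
      · exact Or.inl hp
      · exact Or.inr ⟨i, List.mem_cons_self, j, hj, hrest⟩
      · exact Or.inr ⟨i', List.mem_cons_of_mem _ hi', hrest⟩
    · rintro (hp | ⟨i', hi', hrest⟩)
      · exact Or.inl (Or.inl hp)
      · rcases List.mem_cons.mp hi' with rfl | hi''
        · exact Or.inl (Or.inr hrest)
        · exact Or.inr ⟨i', hi'', hrest⟩

-- characterisation of the grid-scan set comprehension
lemma mem_grownB (arr : List (List Int)) (nr nc : Int) (reached : PySem.Set (Int × Int))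
    (p : Int × Int) :
    p ∈ grownB arr nr nc reached ↔
      (InR nr nc p ∧ gridAt arr p.1 p.2 ≠ 0 ∧ p ∉ reached ∧
        ((p.1 - 1, p.2) ∈ reached ∨ (p.1 + 1, p.2) ∈ reached ∨
         (p.1, p.2 - 1) ∈ reached ∨ (p.1, p.2 + 1) ∈ reached)) := by
  unfold grownB
  rw [mem_grownB_outer]
  constructor
  · rintro (hp | ⟨i, hi, j, hj, rfl, h1, h2, h3⟩)
    · simp [PySem.Set.empty] at hp
    · obtain ⟨hi1, hi2⟩ := PySem.List.mem_pyRange_one.mp hi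
      obtain ⟨hj1, hj2⟩ := PySem.List.mem_pyRange_one.mp hj
      exact ⟨⟨hi1, hi2, hj1, hj2⟩, h1, h2, h3⟩
  · rintro ⟨⟨hi1, hi2, hj1, hj2⟩, h1, h2, h3⟩
    refine Or.inr ⟨p.1, PySem.List.mem_pyRange_one.mpr ⟨hi1, hi2⟩,
      p.2, PySem.List.mem_pyRange_one.mpr ⟨hj1, hj2⟩, rfl, h1, h2, h3⟩

-- A's neighbour-spreading fold, characterised
lemma spreadA (arr : List (List Int)) (nr nc r c dist : Int) :
    ∀ (ds : List (Int × Int)) (qA : List (Int × Int × Int)) (vis : PySem.Set (Int × Int)),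
    ∃ w : List (Int × Int),
      ds.foldl (spreadStepA arr nr nc r c dist) (qA, vis)
        = (qA ++ w.map (fun p => (p.1, p.2, dist + 1)), vis ++ w) ∧
      w.Nodup ∧
      (∀ p ∈ w, InR nr nc p ∧ gridAt arr p.1 p.2 ≠ 0 ∧ p ∉ vis ∧
        ∃ d ∈ ds, p = (r + d.1, c + d.2)) ∧
      (∀ d ∈ ds, InR nr nc (r + d.1, c + d.2) → gridAt arr (r + d.1) (c + d.2) ≠ 0 →
        (r + d.1, c + d.2) ∈ vis ++ w) := by
  intro ds
  induction ds with
  | nil =>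
    intro qA vis
    exact ⟨[], by simp, by simp, by simp, by simp⟩
  | cons dxy ds ih =>
    intro qA vis
    by_cases hC : 0 ≤ r + dxy.1 ∧ r + dxy.1 < nr ∧ 0 ≤ c + dxy.2 ∧ c + dxy.2 < nc ∧
        gridAt arr (r + dxy.1) (c + dxy.2) ≠ 0 ∧ (r + dxy.1, c + dxy.2) ∉ vis
    · have hstep : spreadStepA arr nr nc r c dist (qA, vis) dxy
          = (qA ++ [(r + dxy.1, c + dxy.2, dist + 1)], vis ++ [(r + dxy.1, c + dxy.2)]) := by
        simp only [spreadStepA]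
        rw [if_pos hC, PySem.Set.add_of_not_mem hC.2.2.2.2.2]
      obtain ⟨w, hA, hnd, hprop, hcov⟩ := ih (qA ++ [(r + dxy.1, c + dxy.2, dist + 1)])
        (vis ++ [(r + dxy.1, c + dxy.2)])
      refine ⟨(r + dxy.1, c + dxy.2) :: w, ?_, ?_, ?_, ?_⟩
      · rw [List.foldl_cons, hstep, hA]; simp
      · exact List.nodup_cons.mpr ⟨fun hmem => (hprop _ hmem).2.2.1 (by simp), hnd⟩
      · intro p hp
        rcases List.mem_cons.mp hp with rfl | hpw
        · exact ⟨⟨hC.1, hC.2.1, hC.2.2.1, hC.2.2.2.1⟩, hC.2.2.2.2.1, hC.2.2.2.2.2,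
            dxy, List.mem_cons_self, rfl⟩
        · obtain ⟨hir, hnz, hnv, d, hd, hpd⟩ := hprop p hpw
          exact ⟨hir, hnz, fun hv => hnv (by simp [hv]), d, List.mem_cons_of_mem _ hd, hpd⟩
      · intro d hd h1 h2
        rcases List.mem_cons.mp hd with rfl | hd'
        · refine List.mem_append.mpr (Or.inr (List.mem_cons_self))
        · have := hcov d hd' h1 h2
          rcases List.mem_append.mp this with hv | hw
          · rcases List.mem_append.mp hv with hv' | hv'
            · exact List.mem_append.mpr (Or.inl hv')
            · have : (r + d.1, c + d.2) = (r + dxy.1, c + dxy.2) := by simpa using hv'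
              rw [this]
              exact List.mem_append.mpr (Or.inr List.mem_cons_self)
          · exact List.mem_append.mpr (Or.inr (List.mem_cons_of_mem _ hw))
    · have hstep : spreadStepA arr nr nc r c dist (qA, vis) dxy = (qA, vis) := by
        simp only [spreadStepA]
        rw [if_neg hC]
      obtain ⟨w, hA, hnd, hprop, hcov⟩ := ih qA vis
      refine ⟨w, by rw [List.foldl_cons, hstep]; exact hA, hnd, ?_, ?_⟩
      · intro p hp
        obtain ⟨hir, hnz, hnv, d, hd, hpd⟩ := hprop p hp
        exact ⟨hir, hnz, hnv, d, List.mem_cons_of_mem _ hd, hpd⟩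
      · intro d hd h1 h2
        rcases List.mem_cons.mp hd with rfl | hd'
        · -- the guard failed though in-window and nonzero: the cell must be in vis
          obtain ⟨g1, g2, g3, g4⟩ := h1
          have hv : (r + d.1, c + d.2) ∈ vis := by
            by_contra hnv
            exact hC ⟨g1, g2, g3, g4, h2, hnv⟩
          exact List.mem_append.mpr (Or.inl hv)
        · exact hcov d hd' h1 h2

lemma seedAB_inner (arr : List (List Int)) (i : Int) :
    ∀ (js : List Int) (rB hB : PySem.Set (Int × Int)),
    rB.Nodup → hB.Nodup → js.Nodup →
    (∀ j ∈ js, (i, j) ∉ rB) → (∀ j ∈ js, (i, j) ∉ hB) →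
    (js.foldl (seedStepA arr i) (rB.map (fun p => (p.1, p.2, (0 : Int))), hB)).1
        = (js.foldl (seedStepB arr i) (rB, hB)).1.map (fun p => (p.1, p.2, (0 : Int))) ∧
    (js.foldl (seedStepA arr i) (rB.map (fun p => (p.1, p.2, (0 : Int))), hB)).2
        = (js.foldl (seedStepB arr i) (rB, hB)).2 ∧
    (js.foldl (seedStepB arr i) (rB, hB)).1.Nodup ∧
    (js.foldl (seedStepB arr i) (rB, hB)).2.Nodup ∧
    (∀ p ∈ (js.foldl (seedStepB arr i) (rB, hB)).1,
        p ∈ rB ∨ (p.1 = i ∧ p.2 ∈ js ∧ gridAt arr p.1 p.2 = 2)) ∧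
    (∀ p ∈ (js.foldl (seedStepB arr i) (rB, hB)).2,
        p ∈ hB ∨ (p.1 = i ∧ p.2 ∈ js ∧ gridAt arr p.1 p.2 = 1)) := by
  intro js
  induction js with
  | nil =>
    intro rB hB h1 h2 _ _ _
    exact ⟨rfl, rfl, h1, h2, fun p hp => Or.inl hp, fun p hp => Or.inl hp⟩
  | cons j js ih =>
    intro rB hB hndr hndh hndj hfr hfh
    simp only [List.foldl_cons]
    by_cases hv2 : gridAt arr i j = 2
    · have hfr0 : (i, j) ∉ rB := hfr j List.mem_cons_self
      have hsA : seedStepA arr i (rB.map (fun p => (p.1, p.2, (0 : Int))), hB) j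
          = ((PySem.Set.add rB (i, j)).map (fun p => (p.1, p.2, (0 : Int))), hB) := by
        simp only [seedStepA]
        rw [if_pos hv2, PySem.Set.add_of_not_mem hfr0]
        simp
      have hsB : seedStepB arr i (rB, hB) j = (PySem.Set.add rB (i, j), hB) := by
        simp only [seedStepB]; rw [if_pos hv2]
      rw [hsA, hsB]
      obtain ⟨c1, c2, c3, c4, c5, c6⟩ := ih (PySem.Set.add rB (i, j)) hB
        (PySem.Set.nodup_add _ _ hndr) hndh (List.nodup_cons.mp hndj).2
        (by
          intro j' hj' hmem
          rcases (PySem.Set.mem_add _ _ _).mp hmem with hm | hm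
          · exact hfr j' (List.mem_cons_of_mem _ hj') hm
          · have : j' = j := by simpa using hm
            exact (List.nodup_cons.mp hndj).1 (this ▸ hj'))
        (fun j' hj' => hfh j' (List.mem_cons_of_mem _ hj'))
      refine ⟨c1, c2, c3, c4, ?_, ?_⟩
      · intro p hp
        rcases c5 p hp with hp' | hp'
        · rcases (PySem.Set.mem_add _ _ _).mp hp' with hm | hm
          · exact Or.inl hm
          · subst hm
            exact Or.inr ⟨rfl, List.mem_cons_self, hv2⟩
        · exact Or.inr ⟨hp'.1, List.mem_cons_of_mem _ hp'.2.1, hp'.2.2⟩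
      · intro p hp
        rcases c6 p hp with hp' | hp'
        · exact Or.inl hp'
        · exact Or.inr ⟨hp'.1, List.mem_cons_of_mem _ hp'.2.1, hp'.2.2⟩
    · by_cases hv1 : gridAt arr i j = 1
      · have hfh0 : (i, j) ∉ hB := hfh j List.mem_cons_self
        have hsA : seedStepA arr i (rB.map (fun p => (p.1, p.2, (0 : Int))), hB) j
            = (rB.map (fun p => (p.1, p.2, (0 : Int))), PySem.Set.add hB (i, j)) := by
          simp only [seedStepA]; rw [if_neg hv2, if_pos hv1]
        have hsB : seedStepB arr i (rB, hB) j = (rB, PySem.Set.add hB (i, j)) := by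
          simp only [seedStepB]; rw [if_neg hv2, if_pos hv1]
        rw [hsA, hsB]
        obtain ⟨c1, c2, c3, c4, c5, c6⟩ := ih rB (PySem.Set.add hB (i, j))
          hndr (PySem.Set.nodup_add _ _ hndh) (List.nodup_cons.mp hndj).2
          (fun j' hj' => hfr j' (List.mem_cons_of_mem _ hj'))
          (by
            intro j' hj' hmem
            rcases (PySem.Set.mem_add _ _ _).mp hmem with hm | hm
            · exact hfh j' (List.mem_cons_of_mem _ hj') hm
            · have : j' = j := by simpa using hm
              exact (List.nodup_cons.mp hndj).1 (this ▸ hj'))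
        refine ⟨c1, c2, c3, c4, ?_, ?_⟩
        · intro p hp
          rcases c5 p hp with hp' | hp'
          · exact Or.inl hp'
          · exact Or.inr ⟨hp'.1, List.mem_cons_of_mem _ hp'.2.1, hp'.2.2⟩
        · intro p hp
          rcases c6 p hp with hp' | hp'
          · rcases (PySem.Set.mem_add _ _ _).mp hp' with hm | hm
            · exact Or.inl hm
            · subst hm
              exact Or.inr ⟨rfl, List.mem_cons_self, hv1⟩
          · exact Or.inr ⟨hp'.1, List.mem_cons_of_mem _ hp'.2.1, hp'.2.2⟩
      · have hsA : seedStepA arr i (rB.map (fun p => (p.1, p.2, (0 : Int))), hB) j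
            = (rB.map (fun p => (p.1, p.2, (0 : Int))), hB) := by
          simp only [seedStepA]; rw [if_neg hv2, if_neg hv1]
        have hsB : seedStepB arr i (rB, hB) j = (rB, hB) := by
          simp only [seedStepB]; rw [if_neg hv2, if_neg hv1]
        rw [hsA, hsB]
        obtain ⟨c1, c2, c3, c4, c5, c6⟩ := ih rB hB hndr hndh (List.nodup_cons.mp hndj).2
          (fun j' hj' => hfr j' (List.mem_cons_of_mem _ hj'))
          (fun j' hj' => hfh j' (List.mem_cons_of_mem _ hj'))
        refine ⟨c1, c2, c3, c4, ?_, ?_⟩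
        · intro p hp
          rcases c5 p hp with hp' | hp'
          · exact Or.inl hp'
          · exact Or.inr ⟨hp'.1, List.mem_cons_of_mem _ hp'.2.1, hp'.2.2⟩
        · intro p hp
          rcases c6 p hp with hp' | hp'
          · exact Or.inl hp'
          · exact Or.inr ⟨hp'.1, List.mem_cons_of_mem _ hp'.2.1, hp'.2.2⟩

lemma seedAB_outer (arr : List (List Int)) (nc : Int) :
    ∀ (is_ : List Int) (rB hB : PySem.Set (Int × Int)),
    rB.Nodup → hB.Nodup → is_.Nodup →
    (∀ p ∈ rB, p.1 ∉ is_) → (∀ p ∈ hB, p.1 ∉ is_) →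
    (is_.foldl (fun acc i => (PySem.List.pyRange 0 nc 1).foldl (seedStepA arr i) acc)
        (rB.map (fun p => (p.1, p.2, (0 : Int))), hB)).1
      = (is_.foldl (fun acc i => (PySem.List.pyRange 0 nc 1).foldl (seedStepB arr i) acc)
          (rB, hB)).1.map (fun p => (p.1, p.2, (0 : Int))) ∧
    (is_.foldl (fun acc i => (PySem.List.pyRange 0 nc 1).foldl (seedStepA arr i) acc)
        (rB.map (fun p => (p.1, p.2, (0 : Int))), hB)).2
      = (is_.foldl (fun acc i => (PySem.List.pyRange 0 nc 1).foldl (seedStepB arr i) acc)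
          (rB, hB)).2 ∧
    (is_.foldl (fun acc i => (PySem.List.pyRange 0 nc 1).foldl (seedStepB arr i) acc)
        (rB, hB)).1.Nodup ∧
    (is_.foldl (fun acc i => (PySem.List.pyRange 0 nc 1).foldl (seedStepB arr i) acc)
        (rB, hB)).2.Nodup ∧
    (∀ p ∈ (is_.foldl (fun acc i => (PySem.List.pyRange 0 nc 1).foldl (seedStepB arr i) acc)
        (rB, hB)).1, p ∈ rB ∨ (p.1 ∈ is_ ∧ 0 ≤ p.2 ∧ p.2 < nc ∧ gridAt arr p.1 p.2 = 2)) ∧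
    (∀ p ∈ (is_.foldl (fun acc i => (PySem.List.pyRange 0 nc 1).foldl (seedStepB arr i) acc)
        (rB, hB)).2, p ∈ hB ∨ (p.1 ∈ is_ ∧ 0 ≤ p.2 ∧ p.2 < nc ∧ gridAt arr p.1 p.2 = 1)) := by
  intro is_
  induction is_ with
  | nil =>
    intro rB hB h1 h2 _ _ _
    exact ⟨rfl, rfl, h1, h2, fun p hp => Or.inl hp, fun p hp => Or.inl hp⟩
  | cons i is_ ih =>
    intro rB hB hndr hndh hndi hfr hfh
    simp only [List.foldl_cons]
    obtain ⟨c1, c2, c3, c4, c5, c6⟩ := seedAB_inner arr i (PySem.List.pyRange 0 nc 1) rB hB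
      hndr hndh (PySem.List.nodup_pyRange_one 0 nc)
      (fun j hj hm => hfr _ hm List.mem_cons_self)
      (fun j hj hm => hfh _ hm List.mem_cons_self)
    have hpair : (PySem.List.pyRange 0 nc 1).foldl (seedStepA arr i)
        (rB.map (fun p => (p.1, p.2, (0 : Int))), hB)
        = (((PySem.List.pyRange 0 nc 1).foldl (seedStepB arr i) (rB, hB)).1.map
            (fun p => (p.1, p.2, (0 : Int))),
           ((PySem.List.pyRange 0 nc 1).foldl (seedStepB arr i) (rB, hB)).2) :=
      Prod.ext c1 c2
    rw [hpair]
    obtain ⟨d1, d2, d3, d4, d5, d6⟩ := ih _ _ c3 c4 (List.nodup_cons.mp hndi).2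
      (by
        intro p hp hpin
        rcases c5 p hp with hp' | hp'
        · exact hfr p hp' (List.mem_cons_of_mem _ hpin)
        · exact (List.nodup_cons.mp hndi).1 (hp'.1 ▸ hpin))
      (by
        intro p hp hpin
        rcases c6 p hp with hp' | hp'
        · exact hfh p hp' (List.mem_cons_of_mem _ hpin)
        · exact (List.nodup_cons.mp hndi).1 (hp'.1 ▸ hpin))
    refine ⟨d1, d2, d3, d4, ?_, ?_⟩
    · intro p hp
      rcases d5 p hp with hp' | hp'
      · rcases c5 p hp' with hp'' | hp''
        · exact Or.inl hp''
        · exact Or.inr ⟨hp''.1 ▸ List.mem_cons_self,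
            (PySem.List.mem_pyRange_one.mp hp''.2.1).1,
            (PySem.List.mem_pyRange_one.mp hp''.2.1).2, hp''.2.2⟩
      · exact Or.inr ⟨List.mem_cons_of_mem _ hp'.1, hp'.2.1, hp'.2.2.1, hp'.2.2.2⟩
    · intro p hp
      rcases d6 p hp with hp' | hp'
      · rcases c6 p hp' with hp'' | hp''
        · exact Or.inl hp''
        · exact Or.inr ⟨hp''.1 ▸ List.mem_cons_self,
            (PySem.List.mem_pyRange_one.mp hp''.2.1).1,
            (PySem.List.mem_pyRange_one.mp hp''.2.1).2, hp''.2.2⟩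
      · exact Or.inr ⟨List.mem_cons_of_mem _ hp'.1, hp'.2.1, hp'.2.2.1, hp'.2.2.2⟩

-- the two seeding scans, related
lemma seedAB (arr : List (List Int)) (nr nc : Int) :
    (seedA arr nr nc).1 = (seedB arr nr nc).1.map (fun p => (p.1, p.2, (0 : Int))) ∧
    (seedA arr nr nc).2 = (seedB arr nr nc).2 ∧
    (seedB arr nr nc).1.Nodup ∧ (seedB arr nr nc).2.Nodup ∧
    (∀ p ∈ (seedB arr nr nc).1, InR nr nc p ∧ gridAt arr p.1 p.2 = 2) ∧
    (∀ p ∈ (seedB arr nr nc).2, InR nr nc p ∧ gridAt arr p.1 p.2 = 1) := by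
  obtain ⟨d1, d2, d3, d4, d5, d6⟩ := seedAB_outer arr nc (PySem.List.pyRange 0 nr 1)
    PySem.Set.empty PySem.Set.empty (by simp [PySem.Set.empty]) (by simp [PySem.Set.empty])
    (PySem.List.nodup_pyRange_one 0 nr) (by simp [PySem.Set.empty]) (by simp [PySem.Set.empty])
  have hmap : (PySem.Set.empty : PySem.Set (Int × Int)).map (fun p => (p.1, p.2, (0 : Int)))
      = ([] : List (Int × Int × Int)) := rfl
  rw [hmap] at d1 d2
  refine ⟨d1, d2, d3, d4, ?_, ?_⟩
  · intro p hp
    rcases d5 p hp with hp' | hp'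
    · simp [PySem.Set.empty] at hp'
    · exact ⟨⟨(PySem.List.mem_pyRange_one.mp hp'.1).1, (PySem.List.mem_pyRange_one.mp hp'.1).2,
        hp'.2.1, hp'.2.2.1⟩, hp'.2.2.2⟩
  · intro p hp
    rcases d6 p hp with hp' | hp'
    · simp [PySem.Set.empty] at hp'
    · exact ⟨⟨(PySem.List.mem_pyRange_one.mp hp'.1).1, (PySem.List.mem_pyRange_one.mp hp'.1).2,
        hp'.2.1, hp'.2.2.1⟩, hp'.2.2.2⟩

-- a queue none of whose entries can remove a healthy cell or spread anywhere new
lemma inertA (arr : List (List Int)) (nr nc : Int) :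
    ∀ (fA : Nat) (Q : List (Int × Int × Int)) (vis hs : PySem.Set (Int × Int)),
    hs ≠ [] →
    (∀ e ∈ Q, (e.1, e.2.1) ∉ hs) →
    (∀ e ∈ Q, ∀ d ∈ dirsA, InR nr nc (e.1 + d.1, e.2.1 + d.2) →
      gridAt arr (e.1 + d.1) (e.2.1 + d.2) ≠ 0 → (e.1 + d.1, e.2.1 + d.2) ∈ vis) →
    loopA arr nr nc fA Q vis hs = -1 := by
  intro fA
  induction fA with
  | zero =>
    intro Q vis hs h1 h2 h3
    cases Q with
    | nil => rfl
    | cons e Q' => rfl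
  | succ f ih =>
    intro Q vis hs h1 h2 h3
    cases Q with
    | nil => rfl
    | cons e Q' =>
      obtain ⟨r, c, dist⟩ := e
      have hnm : (r, c) ∉ hs := h2 (r, c, dist) List.mem_cons_self
      simp only [loopA]
      rw [if_neg hnm, if_neg h1]
      obtain ⟨w, hst, hnd, hprop, hcov⟩ :=
        spreadA arr nr nc r c dist dirsA Q' (PySem.Set.add vis (r, c))
      have hw : w = [] := by
        cases w with
        | nil => rfl
        | cons x xs =>
          obtain ⟨hir, hnz, hnv, d, hd, hpd⟩ := hprop x List.mem_cons_self
          subst hpd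
          have hxv : (r + d.1, c + d.2) ∈ vis :=
            h3 (r, c, dist) List.mem_cons_self d hd hir hnz
          exact absurd ((PySem.Set.mem_add _ _ _).mpr (Or.inl hxv)) hnv
      subst hw
      rw [hst]
      simp only [List.map_nil, List.append_nil]
      exact ih Q' _ hs h1 (fun e he => h2 e (List.mem_cons_of_mem _ he))
        (fun e he d hd hi hz =>
          (PySem.Set.mem_add _ _ _).mpr (Or.inl (h3 e (List.mem_cons_of_mem _ he) d hd hi hz)))

-- if x sits d away from c (d a unit direction), then c is one of x's four neighbours
lemma flip1 (c : Int × Int) (d : Int × Int) (hd : d ∈ dirsA) :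
    c = ((c.1 + d.1) - 1, c.2 + d.2) ∨ c = ((c.1 + d.1) + 1, c.2 + d.2) ∨
    c = (c.1 + d.1, (c.2 + d.2) - 1) ∨ c = (c.1 + d.1, (c.2 + d.2) + 1) := by
  simp only [dirsA, List.mem_cons, List.not_mem_nil, or_false] at hd
  rcases hd with rfl | rfl | rfl | rfl
  · exact Or.inr (Or.inr (Or.inl (Prod.ext (by omega) (by omega))))
  · exact Or.inl (Prod.ext (by omega) (by omega))
  · exact Or.inr (Or.inr (Or.inr (Prod.ext (by omega) (by omega))))
  · exact Or.inr (Or.inl (Prod.ext (by omega) (by omega)))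

-- if c is one of p's four neighbours, then p = c + d for a unit direction d
lemma flip2 (p c : Int × Int)
    (h : c = (p.1 - 1, p.2) ∨ c = (p.1 + 1, p.2) ∨ c = (p.1, p.2 - 1) ∨ c = (p.1, p.2 + 1)) :
    ∃ d ∈ dirsA, p = (c.1 + d.1, c.2 + d.2) := by
  rcases h with rfl | rfl | rfl | rfl
  · exact ⟨(1, 0), by simp [dirsA], Prod.ext (by omega) (by omega)⟩
  · exact ⟨(-1, 0), by simp [dirsA], Prod.ext (by omega) (by omega)⟩
  · exact ⟨(0, 1), by simp [dirsA], Prod.ext (by omega) (by omega)⟩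
  · exact ⟨(0, -1), by simp [dirsA], Prod.ext (by omega) (by omega)⟩

-- the main simulation invariant: A mid-level versus B at the same level
lemma sim (arr : List (List Int)) (nr nc : Int) (H : PySem.Set (Int × Int))
    (hH : ∀ p ∈ H, InR nr nc p ∧ gridAt arr p.1 p.2 = 1) :
    ∀ (n fA fB : Nat) (rest M : List (Int × Int))
      (vis reached hs : PySem.Set (Int × Int)) (t : Int),
    fA + fB ≤ n →
    rest.length + M.length + nr.toNat * nc.toNat ≤ fA + vis.length →
    nr.toNat * nc.toNat + 1 ≤ fB + reached.length →
    hs ≠ [] →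
    (∀ p ∈ vis, p ∈ reached ∨ p ∈ M) →
    (∀ p ∈ reached, p ∈ vis ∨ p ∈ rest) →
    (∀ p ∈ M, p ∈ vis) →
    (∀ p ∈ rest, p ∈ vis ∨ gridAt arr p.1 p.2 = 2) →
    (∀ p ∈ M, p ∈ reached → gridAt arr p.1 p.2 = 2) →
    (∀ p ∈ M, InR nr nc p ∧ gridAt arr p.1 p.2 ≠ 0 ∧
      ((p.1 - 1, p.2) ∈ reached ∨ (p.1 + 1, p.2) ∈ reached ∨
       (p.1, p.2 - 1) ∈ reached ∨ (p.1, p.2 + 1) ∈ reached)) →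
    (∀ p ∈ rest, p ∈ reached) →
    rest.Nodup → M.Nodup → vis.Nodup → reached.Nodup →
    (∀ p q, InR nr nc p → gridAt arr p.1 p.2 ≠ 0 → p ∉ vis → q ∈ reached →
      (q = (p.1 - 1, p.2) ∨ q = (p.1 + 1, p.2) ∨ q = (p.1, p.2 - 1) ∨ q = (p.1, p.2 + 1)) →
      q ∈ rest) →
    (∀ p, p ∈ hs ↔ p ∈ H ∧ (p ∉ reached ∨ p ∈ rest)) →
    (∀ p ∈ vis, InR nr nc p) →
    (∀ p ∈ reached, InR nr nc p) →
    loopA arr nr nc fA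
        (rest.map (fun p => (p.1, p.2, t)) ++ M.map (fun p => (p.1, p.2, t + 1))) vis hs
      = loopB arr nr nc H fB reached t := by
  intro n
  induction n using Nat.strong_induction_on with
  | _ n IH =>
  intro fA fB rest M vis reached hs t hn hfA hfB hhs ha hb hc hf he hM hrr
    hndrest hndM hndvis hndreach hc5 hc6 hvisR hreachR
  have hvisLe := length_le_area nr nc vis hndvis hvisR
  have hreachLe := length_le_area nr nc reached hndreach hreachR
  cases rest with
  | nil =>
    simp only [List.map_nil, List.nil_append]
    obtain ⟨fb, rfl⟩ : ∃ fb, fB = fb + 1 := ⟨fB - 1, by omega⟩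
    obtain ⟨p0, hp0⟩ : ∃ p, p ∈ hs := List.exists_mem_of_ne_nil hs hhs
    have hp0H := (hc6 p0).mp hp0
    have hp0nr : p0 ∉ reached := by
      rcases hp0H.2 with h | h
      · exact h
      · simp at h
    have hcheck : ¬ (∀ p ∈ H, p ∈ reached) := fun hall => hp0nr (hall p0 hp0H.1)
    simp only [loopB]
    rw [if_neg hcheck]
    have hgiff : ∀ p, p ∈ grownB arr nr nc reached ↔ p ∈ M ∧ p ∉ reached := by
      intro p
      constructor
      · intro hpg
        obtain ⟨hir, hnz, hnr, hadj⟩ := (mem_grownB arr nr nc reached p).mp hpg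
        have hpv : p ∈ vis := by
          by_contra hnv
          rcases hadj with h | h | h | h
          · exact absurd (hc5 p _ hir hnz hnv h (Or.inl rfl)) (by simp)
          · exact absurd (hc5 p _ hir hnz hnv h (Or.inr (Or.inl rfl))) (by simp)
          · exact absurd (hc5 p _ hir hnz hnv h (Or.inr (Or.inr (Or.inl rfl)))) (by simp)
          · exact absurd (hc5 p _ hir hnz hnv h (Or.inr (Or.inr (Or.inr rfl)))) (by simp)
        rcases ha p hpv with h | h
        · exact absurd h hnr
        · exact ⟨h, hnr⟩
      · rintro ⟨hpM, hnr⟩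
        obtain ⟨hir, hnz, hadj⟩ := hM p hpM
        exact (mem_grownB arr nr nc reached p).mpr ⟨hir, hnz, hnr, hadj⟩
    by_cases hgnil : grownB arr nr nc reached = []
    · rw [if_pos hgnil]
      apply inertA arr nr nc fA _ vis hs hhs
      · intro e hEq
        obtain ⟨p, hpM, rfl⟩ := List.mem_map.mp hEq
        intro hphs
        have hp2 : (p.1, p.2) ∈ hs := hphs
        have := (hc6 (p.1, p.2)).mp hp2
        rcases this.2 with h | h
        · have : (p.1, p.2) ∈ grownB arr nr nc reached := by
            rw [hgiff]
            exact ⟨by simpa using hpM, h⟩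
          rw [hgnil] at this
          simp at this
        · simp at h
      · intro e hEq d hd hi hz
        obtain ⟨p, hpM, rfl⟩ := List.mem_map.mp hEq
        -- p ∈ M ⊆ reached here (g is empty), so its unvisited neighbours would be in rest = []
        have hpr : p ∈ reached := by
          by_contra hnr
          have : p ∈ grownB arr nr nc reached := (hgiff p).mpr ⟨hpM, hnr⟩
          rw [hgnil] at this
          simp at this
        by_contra hnv
        have hflip := flip1 p d hd
        rcases hflip with h | h | h | h
        · exact absurd (hc5 (p.1 + d.1, p.2 + d.2) p hi hz hnv hpr (Or.inl h)) (by simp)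
        · exact absurd (hc5 (p.1 + d.1, p.2 + d.2) p hi hz hnv hpr (Or.inr (Or.inl h))) (by simp)
        · exact absurd (hc5 (p.1 + d.1, p.2 + d.2) p hi hz hnv hpr
            (Or.inr (Or.inr (Or.inl h)))) (by simp)
        · exact absurd (hc5 (p.1 + d.1, p.2 + d.2) p hi hz hnv hpr
            (Or.inr (Or.inr (Or.inr h)))) (by simp)
    · rw [if_neg hgnil]
      obtain ⟨x, hxg⟩ : ∃ x, x ∈ grownB arr nr nc reached :=
        List.exists_mem_of_ne_nil _ hgnil
      have hxM := (hgiff x).mp hxg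
      have hlen' := length_foldl_add_lt (grownB arr nr nc reached) reached hndreach x hxg hxM.2
      have hmemr' : ∀ p, p ∈ (grownB arr nr nc reached).foldl PySem.Set.add reached ↔
          p ∈ reached ∨ p ∈ grownB arr nr nc reached := fun p => mem_foldl_add _ _ p
      have heq := IH (fA + fb) (by omega) fA fb M []
        vis ((grownB arr nr nc reached).foldl PySem.Set.add reached) hs (t + 1)
        (le_refl _)
        (by simpa using hfA)
        (by omega)
        hhs
        (by
          intro p hp
          rcases ha p hp with h | h
          · exact Or.inl ((hmemr' p).mpr (Or.inl h))
          · by_cases hpr : p ∈ reached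
            · exact Or.inl ((hmemr' p).mpr (Or.inl hpr))
            · exact Or.inl ((hmemr' p).mpr (Or.inr ((hgiff p).mpr ⟨h, hpr⟩))))
        (by
          intro p hp
          rcases (hmemr' p).mp hp with h | h
          · rcases hb p h with h' | h'
            · exact Or.inl h'
            · simp at h'
          · exact Or.inr ((hgiff p).mp h).1)
        (by simp)
        (fun p hp => Or.inl (hc p hp))
        (by simp)
        (by simp)
        (by
          intro p hp
          by_cases hpr : p ∈ reached
          · exact (hmemr' p).mpr (Or.inl hpr)
          · exact (hmemr' p).mpr (Or.inr ((hgiff p).mpr ⟨hp, hpr⟩)))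
        hndM List.nodup_nil hndvis (nodup_foldl_add _ _ hndreach)
        (by
          intro p q hir hnz hnv hq hd
          rcases (hmemr' q).mp hq with h | h
          · exact absurd (hc5 p q hir hnz hnv h hd) (by simp)
          · exact ((hgiff q).mp h).1)
        (by
          intro p
          rw [hc6 p]
          constructor
          · rintro ⟨hpH, hpr⟩
            have hnr : p ∉ reached := by
              rcases hpr with h | h
              · exact h
              · simp at h
            by_cases hpM : p ∈ M
            · exact ⟨hpH, Or.inr hpM⟩
            · refine ⟨hpH, Or.inl ?_⟩
              intro hmem
              rcases (hmemr' p).mp hmem with h | h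
              · exact hnr h
              · exact hpM ((hgiff p).mp h).1
          · rintro ⟨hpH, hpr⟩
            refine ⟨hpH, Or.inl ?_⟩
            rcases hpr with h | h
            · exact fun hr => h ((hmemr' p).mpr (Or.inl hr))
            · intro hr
              have := he p h hr
              have := (hH p hpH).2
              omega)
        hvisR
        (by
          intro p hp
          rcases (hmemr' p).mp hp with h | h
          · exact hreachR p h
          · exact ((mem_grownB arr nr nc reached p).mp h).1)
      simpa using heq
  | cons chead rest' =>
    obtain ⟨c1, c2⟩ := chead
    obtain ⟨fa, rfl⟩ : ∃ fa, fA = fa + 1 := by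
      refine ⟨fA - 1, ?_⟩
      have : rest'.length + 1 + M.length + nr.toNat * nc.toNat ≤ fA + vis.length := by
        simpa [Nat.add_comm, Nat.add_left_comm] using hfA
      omega
    have hcr : (c1, c2) ∈ reached := hrr (c1, c2) List.mem_cons_self
    have hcInR : InR nr nc (c1, c2) := hreachR _ hcr
    simp only [List.map_cons, List.cons_append, loopA]
    by_cases hmem : (c1, c2) ∈ hs
    · rw [if_pos hmem, PySem.Set.remove?_of_mem hmem]
      simp only [Option.getD_some]
      by_cases hemp : PySem.Set.discard hs (c1, c2) = []
      · rw [if_pos hemp]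
        obtain ⟨fb, rfl⟩ : ∃ fb, fB = fb + 1 := ⟨fB - 1, by omega⟩
        have hcheck : ∀ p ∈ H, p ∈ reached := by
          intro p hpH
          by_cases hphs : p ∈ hs
          · by_cases hpc : p = (c1, c2)
            · exact hpc ▸ hcr
            · have : p ∈ PySem.Set.discard hs (c1, c2) :=
                (PySem.Set.mem_discard _ _ _).mpr ⟨hphs, hpc⟩
              rw [hemp] at this
              simp at this
          · by_contra hnr
            exact hphs ((hc6 p).mpr ⟨hpH, Or.inl hnr⟩)
        simp only [loopB]
        rw [if_pos hcheck]
      · rw [if_neg hemp]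
        obtain ⟨w, hst, hwnd, hwprop, hwcov⟩ := spreadA arr nr nc c1 c2 t dirsA
          (rest'.map (fun p => (p.1, p.2, t)) ++ M.map (fun p => (p.1, p.2, t + 1)))
          (PySem.Set.add vis (c1, c2))
        rw [hst]
        have hwvis : ∀ p ∈ w, p ∉ vis ∧ p ≠ (c1, c2) := by
          intro p hp
          have hnv := (hwprop p hp).2.2.1
          exact ⟨fun hv => hnv ((PySem.Set.mem_add _ _ _).mpr (Or.inl hv)),
            fun hpc => hnv ((PySem.Set.mem_add _ _ _).mpr (Or.inr hpc))⟩
        have hvis1len : vis.length ≤ (PySem.Set.add vis (c1, c2)).length := by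
          rw [PySem.Set.add_eq_ite]
          split <;> simp
        have heq := IH (fa + fB) (by omega) fa fB rest' (M ++ w)
          (PySem.Set.add vis (c1, c2) ++ w) reached (PySem.Set.discard hs (c1, c2)) t
          (le_refl _)
          (by
            have e1 : (M ++ w).length = M.length + w.length := List.length_append
            have e2 : (PySem.Set.add vis (c1, c2) ++ w).length
                = (PySem.Set.add vis (c1, c2)).length + w.length := List.length_append
            have e3 : ((c1, c2) :: rest').length = rest'.length + 1 := List.length_cons
            omega)
          hfB
          hemp
          (by
            intro p hp
            rcases List.mem_append.mp hp with hp' | hp'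
            · rcases (PySem.Set.mem_add _ _ _).mp hp' with h | h
              · rcases ha p h with h' | h'
                · exact Or.inl h'
                · exact Or.inr (List.mem_append.mpr (Or.inl h'))
              · exact Or.inl (h ▸ hcr)
            · exact Or.inr (List.mem_append.mpr (Or.inr hp')))
          (by
            intro p hp
            rcases hb p hp with h | h
            · exact Or.inl (List.mem_append.mpr (Or.inl ((PySem.Set.mem_add _ _ _).mpr (Or.inl h))))
            · rcases List.mem_cons.mp h with rfl | h'
              · exact Or.inl (List.mem_append.mpr (Or.inl
                  ((PySem.Set.mem_add _ _ _).mpr (Or.inr rfl))))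
              · exact Or.inr h')
          (by
            intro p hp
            rcases List.mem_append.mp hp with hp' | hp'
            · exact List.mem_append.mpr (Or.inl ((PySem.Set.mem_add _ _ _).mpr
                (Or.inl (hc p hp'))))
            · exact List.mem_append.mpr (Or.inr hp'))
          (by
            intro p hp
            rcases hf p (List.mem_cons_of_mem _ hp) with h | h
            · exact Or.inl (List.mem_append.mpr (Or.inl ((PySem.Set.mem_add _ _ _).mpr
                (Or.inl h))))
            · exact Or.inr h)
          (by
            intro p hp hpr
            rcases List.mem_append.mp hp with hp' | hp'
            · exact he p hp' hpr
            · obtain ⟨hnvis, hnc⟩ := hwvis p hp'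
              rcases hb p hpr with h | h
              · exact absurd h hnvis
              · rcases List.mem_cons.mp h with h' | h'
                · exact absurd h' hnc
                · rcases hf p (List.mem_cons_of_mem _ h') with h'' | h''
                  · exact absurd h'' hnvis
                  · exact h'')
          (by
            intro p hp
            rcases List.mem_append.mp hp with hp' | hp'
            · exact hM p hp'
            · obtain ⟨hir, hnz, _, d, hd, hpd⟩ := hwprop p hp'
              refine ⟨hir, hnz, ?_⟩
              subst hpd
              rcases flip1 (c1, c2) d hd with h | h | h | h
              · exact Or.inl (h ▸ hcr)
              · exact Or.inr (Or.inl (h ▸ hcr))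
              · exact Or.inr (Or.inr (Or.inl (h ▸ hcr)))
              · exact Or.inr (Or.inr (Or.inr (h ▸ hcr))))
          (fun p hp => hrr p (List.mem_cons_of_mem _ hp))
          (List.nodup_cons.mp hndrest).2
          (by
            rw [List.nodup_append]
            refine ⟨hndM, hwnd, ?_⟩
            intro p hp q hq heq2
            subst heq2
            exact (hwvis p hq).1 (hc p hp)
            )
          (by
            rw [List.nodup_append]
            refine ⟨PySem.Set.nodup_add _ _ hndvis, hwnd, ?_⟩
            intro p hp q hq heq2
            subst heq2
            exact (hwprop p hq).2.2.1 hp)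
          hndreach
          (by
            intro p q hir hnz hnv hq hd
            have hnv0 : p ∉ PySem.Set.add vis (c1, c2) ++ w :=
              hnv
            have hnv1 : p ∉ vis := fun hv => hnv0 (List.mem_append.mpr
              (Or.inl ((PySem.Set.mem_add _ _ _).mpr (Or.inl hv))))
            have := hc5 p q hir hnz hnv1 hq hd
            rcases List.mem_cons.mp this with rfl | h'
            · -- q is the popped cell: p is an unvisited neighbour, but all those are in vis'
              exfalso
              obtain ⟨d', hd', hpd⟩ := flip2 p (c1, c2) hd
              subst hpd
              exact hnv0 (hwcov d' hd' hir hnz)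
            · exact h')
          (by
            intro p
            rw [PySem.Set.mem_discard, hc6 p]
            constructor
            · rintro ⟨⟨hpH, hpr⟩, hpc⟩
              refine ⟨hpH, ?_⟩
              rcases hpr with h | h
              · exact Or.inl h
              · rcases List.mem_cons.mp h with h' | h'
                · exact absurd h' hpc
                · exact Or.inr h'
            · rintro ⟨hpH, hpr⟩
              have hpc : p ≠ (c1, c2) := by
                rintro rfl
                rcases hpr with h | h
                · exact h hcr
                · exact (List.nodup_cons.mp hndrest).1 h
              refine ⟨⟨hpH, ?_⟩, hpc⟩
              rcases hpr with h | h
              · exact Or.inl h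
              · exact Or.inr (List.mem_cons_of_mem _ h))
          (by
            intro p hp
            rcases List.mem_append.mp hp with hp' | hp'
            · rcases (PySem.Set.mem_add _ _ _).mp hp' with h | h
              · exact hvisR p h
              · exact h ▸ hcInR
            · exact (hwprop p hp').1)
          hreachR
        rw [List.map_append] at heq
        simpa [List.append_assoc] using heq
    · rw [if_neg hmem, if_neg hhs]
      obtain ⟨w, hst, hwnd, hwprop, hwcov⟩ := spreadA arr nr nc c1 c2 t dirsA
        (rest'.map (fun p => (p.1, p.2, t)) ++ M.map (fun p => (p.1, p.2, t + 1)))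
        (PySem.Set.add vis (c1, c2))
      rw [hst]
      have hwvis : ∀ p ∈ w, p ∉ vis ∧ p ≠ (c1, c2) := by
        intro p hp
        have hnv := (hwprop p hp).2.2.1
        exact ⟨fun hv => hnv ((PySem.Set.mem_add _ _ _).mpr (Or.inl hv)),
          fun hpc => hnv ((PySem.Set.mem_add _ _ _).mpr (Or.inr hpc))⟩
      have hvis1len : vis.length ≤ (PySem.Set.add vis (c1, c2)).length := by
        rw [PySem.Set.add_eq_ite]
        split <;> simp
      have heq := IH (fa + fB) (by omega) fa fB rest' (M ++ w)
        (PySem.Set.add vis (c1, c2) ++ w) reached hs t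
        (le_refl _)
        (by
          have e1 : (M ++ w).length = M.length + w.length := List.length_append
          have e2 : (PySem.Set.add vis (c1, c2) ++ w).length
              = (PySem.Set.add vis (c1, c2)).length + w.length := List.length_append
          have e3 : ((c1, c2) :: rest').length = rest'.length + 1 := List.length_cons
          omega)
        hfB
        hhs
        (by
          intro p hp
          rcases List.mem_append.mp hp with hp' | hp'
          · rcases (PySem.Set.mem_add _ _ _).mp hp' with h | h
            · rcases ha p h with h' | h'
              · exact Or.inl h'
              · exact Or.inr (List.mem_append.mpr (Or.inl h'))
            · exact Or.inl (h ▸ hcr)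
          · exact Or.inr (List.mem_append.mpr (Or.inr hp')))
        (by
          intro p hp
          rcases hb p hp with h | h
          · exact Or.inl (List.mem_append.mpr (Or.inl ((PySem.Set.mem_add _ _ _).mpr (Or.inl h))))
          · rcases List.mem_cons.mp h with rfl | h'
            · exact Or.inl (List.mem_append.mpr (Or.inl
                ((PySem.Set.mem_add _ _ _).mpr (Or.inr rfl))))
            · exact Or.inr h')
        (by
          intro p hp
          rcases List.mem_append.mp hp with hp' | hp'
          · exact List.mem_append.mpr (Or.inl ((PySem.Set.mem_add _ _ _).mpr
              (Or.inl (hc p hp'))))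
          · exact List.mem_append.mpr (Or.inr hp'))
        (by
          intro p hp
          rcases hf p (List.mem_cons_of_mem _ hp) with h | h
          · exact Or.inl (List.mem_append.mpr (Or.inl ((PySem.Set.mem_add _ _ _).mpr
              (Or.inl h))))
          · exact Or.inr h)
        (by
          intro p hp hpr
          rcases List.mem_append.mp hp with hp' | hp'
          · exact he p hp' hpr
          · obtain ⟨hnvis, hnc⟩ := hwvis p hp'
            rcases hb p hpr with h | h
            · exact absurd h hnvis
            · rcases List.mem_cons.mp h with h' | h'
              · exact absurd h' hnc
              · rcases hf p (List.mem_cons_of_mem _ h') with h'' | h''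
                · exact absurd h'' hnvis
                · exact h'')
        (by
          intro p hp
          rcases List.mem_append.mp hp with hp' | hp'
          · exact hM p hp'
          · obtain ⟨hir, hnz, _, d, hd, hpd⟩ := hwprop p hp'
            refine ⟨hir, hnz, ?_⟩
            subst hpd
            rcases flip1 (c1, c2) d hd with h | h | h | h
            · exact Or.inl (h ▸ hcr)
            · exact Or.inr (Or.inl (h ▸ hcr))
            · exact Or.inr (Or.inr (Or.inl (h ▸ hcr)))
            · exact Or.inr (Or.inr (Or.inr (h ▸ hcr))))
        (fun p hp => hrr p (List.mem_cons_of_mem _ hp))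
        (List.nodup_cons.mp hndrest).2
        (by
          rw [List.nodup_append]
          refine ⟨hndM, hwnd, ?_⟩
          intro p hp q hq heq2
          subst heq2
          exact (hwvis p hq).1 (hc p hp))
        (by
          rw [List.nodup_append]
          refine ⟨PySem.Set.nodup_add _ _ hndvis, hwnd, ?_⟩
          intro p hp q hq heq2
          subst heq2
          exact (hwprop p hq).2.2.1 hp)
        hndreach
        (by
          intro p q hir hnz hnv hq hd
          have hnv0 : p ∉ PySem.Set.add vis (c1, c2) ++ w := hnv
          have hnv1 : p ∉ vis := fun hv => hnv0 (List.mem_append.mpr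
            (Or.inl ((PySem.Set.mem_add _ _ _).mpr (Or.inl hv))))
          have := hc5 p q hir hnz hnv1 hq hd
          rcases List.mem_cons.mp this with rfl | h'
          · exfalso
            obtain ⟨d', hd', hpd⟩ := flip2 p (c1, c2) hd
            subst hpd
            exact hnv0 (hwcov d' hd' hir hnz)
          · exact h')
        (by
          intro p
          rw [hc6 p]
          constructor
          · rintro ⟨hpH, hpr⟩
            refine ⟨hpH, ?_⟩
            rcases hpr with h | h
            · exact Or.inl h
            · rcases List.mem_cons.mp h with h' | h'
              · -- p would be the popped cell, but the popped cell is not in hs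
                exfalso
                exact hmem ((hc6 (c1, c2)).mpr ⟨h' ▸ hpH, Or.inr List.mem_cons_self⟩)
              · exact Or.inr h'
          · rintro ⟨hpH, hpr⟩
            refine ⟨hpH, ?_⟩
            rcases hpr with h | h
            · exact Or.inl h
            · exact Or.inr (List.mem_cons_of_mem _ h))
        (by
          intro p hp
          rcases List.mem_append.mp hp with hp' | hp'
          · rcases (PySem.Set.mem_add _ _ _).mp hp' with h | h
            · exact hvisR p h
            · exact h ▸ hcInR
          · exact (hwprop p hp').1)
        hreachR
      rw [List.map_append] at heq
      simpa [List.append_assoc] using heq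

-- ===== VERDICT (by name: the statement is the Claim_ definition above) =====
theorem solve_spec : Claim_equal_solve := by
  unfold Claim_equal_solve
  intro arr nr nc _ _
  unfold Spec_solve
  obtain ⟨s1, s2, s3, s4, s5, s6⟩ := seedAB arr nr nc
  simp only [solve, solve_alt]
  by_cases hH : (seedB arr nr nc).2 = []
  · rw [if_pos hH]
    have hsA : (seedA arr nr nc).2 = [] := by rw [s2, hH]
    by_cases hcells : (seedB arr nr nc).1 = []
    · rw [if_pos hcells]
      have hqA : (seedA arr nr nc).1 = [] := by rw [s1, hcells]; rfl
      rw [hqA]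
      cases h : ([] : List (Int × Int × Int)).length + nr.toNat * nc.toNat <;> simp [loopA]
    · rw [if_neg hcells]
      obtain ⟨p0, cells', hc'⟩ := List.exists_cons_of_ne_nil hcells
      have hqA : (seedA arr nr nc).1 = (p0.1, p0.2, (0 : Int)) ::
          cells'.map (fun p => (p.1, p.2, (0 : Int))) := by rw [s1, hc']; rfl
      rw [hqA]
      rw [show ((p0.1, p0.2, (0 : Int)) :: cells'.map (fun p => (p.1, p.2, (0 : Int)))).length
          + nr.toNat * nc.toNat = (cells'.length + nr.toNat * nc.toNat) + 1 from by
        simp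
        omega]
      simp only [loopA]
      have hnm : (p0.1, p0.2) ∉ (seedA arr nr nc).2 := by rw [hsA]; simp
      rw [if_neg hnm, if_pos hsA]
  · rw [if_neg hH]
    rw [s1, s2]
    have hlen : ((seedB arr nr nc).1.map (fun p => (p.1, p.2, (0 : Int)))).length
        = (seedB arr nr nc).1.length := List.length_map _
    rw [hlen]
    have heq := sim arr nr nc (seedB arr nr nc).2 s6
      (((seedB arr nr nc).1.length + nr.toNat * nc.toNat) + (nr.toNat * nc.toNat + 1))
      ((seedB arr nr nc).1.length + nr.toNat * nc.toNat) (nr.toNat * nc.toNat + 1)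
      (seedB arr nr nc).1 [] PySem.Set.empty (seedB arr nr nc).1 (seedB arr nr nc).2 0
      (le_refl _)
      (by simp [PySem.Set.empty])
      (by omega)
      hH
      (by simp [PySem.Set.empty])
      (fun p hp => Or.inr hp)
      (by simp)
      (fun p hp => Or.inr (s5 p hp).2)
      (by simp)
      (by simp)
      (fun p hp => hp)
      s3 List.nodup_nil (by simp [PySem.Set.empty]) s3
      (fun p q _ _ _ hq _ => hq)
      (by
        intro p
        constructor
        · intro hp
          refine ⟨hp, ?_⟩
          rcases Decidable.em (p ∈ (seedB arr nr nc).1) with h | h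
          · exact Or.inr h
          · exact Or.inl h
        · exact fun hp => hp.1)
      (by simp [PySem.Set.empty])
      (fun p hp => (s5 p hp).1)
    simpa using heq
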